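-- pv_equiv track=rewrite | github.com/eswar051192V/MyEngine | agents/india_metals_scraper.py | parse_metal_ticker
-- ===== SOURCE A (Python) =====
-- def parse_metal_ticker(ticker: str) -> tuple[str, str] | None:
--     """
--     Parse a synthetic metal ticker like GOLD_DELHI.MCX.
--     Returns (metal, city) or None if not a metal ticker.
--     """
--     ticker = ticker.strip().upper()
--     if not ticker.endswith(".MCX"):
--         return None
--
--     base = ticker[:-4]  # Remove .MCX
--     for prefix in ("GOLD_", "SILVER_", "PLATINUM_"):
--         if base.startswith(prefix):
--             metal = prefix.rstrip("_").lower()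
--             city = base[len(prefix):].lower().replace("_", " ").strip()
--             return metal, city
--
--     return None
-- ===== SOURCE B (Python) =====
-- def parse_metal_ticker(ticker: str) -> tuple[str, str] | None:
--     t = ticker.strip().upper()
--     if not t.endswith(".MCX"):
--         return None
--     base = t[:-4]
--     i = base.find("_")
--     if i == -1:
--         return None
--     metal, city = base[:i], base[i + 1:]
--     if metal not in ("GOLD", "SILVER", "PLATINUM"):
--         return None
--     return metal.lower(), city.lower().replace("_", " ").strip()
-- ===== Notes on version B (the rewrite author's own statement) =====
-- stated objective: idiomatic
-- what changed: B replaces A's loop over the three candidate metal prefixes with a single split of the base at its first underscore (str.find) followed by one membership test of the metal token.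
import Mathlib
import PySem

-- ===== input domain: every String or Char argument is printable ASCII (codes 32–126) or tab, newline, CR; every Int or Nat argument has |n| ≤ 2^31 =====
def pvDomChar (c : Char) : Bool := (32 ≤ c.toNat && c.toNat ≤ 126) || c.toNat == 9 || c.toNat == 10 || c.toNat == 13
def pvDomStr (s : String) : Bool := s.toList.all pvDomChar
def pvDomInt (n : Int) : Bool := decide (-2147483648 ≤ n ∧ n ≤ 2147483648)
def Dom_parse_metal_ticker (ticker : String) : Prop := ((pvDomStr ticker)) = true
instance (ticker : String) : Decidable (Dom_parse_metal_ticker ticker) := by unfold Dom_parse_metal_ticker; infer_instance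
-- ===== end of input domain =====

-- B replaces A's candidate-prefix loop by a single split at the first '_' followed by one
-- membership test of the metal name (objective: idiomatic; same return value everywhere).

-- ===== PORT A =====
-- Python's p.rstrip("_") (PySem has no rstrip-with-chars form); exact: drops all trailing '_'.
def pmtRstripUnderscore (p : List Char) : List Char :=
  (p.reverse.dropWhile (fun c => c == '_')).reverse

-- A's `for prefix in ("GOLD_", "SILVER_", "PLATINUM_")` loop, one step per candidate prefix.
def pmtGo (base : List Char) : List (List Char) → Option (String × String)
  | [] => none
  | p :: ps =>
    if PySem.Chars.startswith base p then
      some (String.ofList (PySem.Chars.lower (pmtRstripUnderscore p)),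
            String.ofList (PySem.Chars.strip (PySem.Chars.replace
              (PySem.Chars.lower (PySem.Chars.slice base (some (p.length : Int)) none)) ['_'] [' '])))
    else pmtGo base ps

def parse_metal_ticker (ticker : String) : Option (String × String) :=
  let t := PySem.Chars.upper (PySem.Chars.strip ticker.toList)
  if PySem.Chars.endswith t ".MCX".toList then
    pmtGo (PySem.Chars.slice t none (some (-4)))
      ["GOLD_".toList, "SILVER_".toList, "PLATINUM_".toList]
  else none

-- ===== PORT B =====
-- Source B's helper _parse_base(base): split at the first '_', then one membership test.
def pmtAltCore (base : List Char) : Option (String × String) :=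
  let i := PySem.Chars.find base ['_']
  if i == -1 then none
  else
    let metal := PySem.Chars.slice base none (some i)
    let city := PySem.Chars.slice base (some (i + 1)) none
    if metal ∈ (["GOLD".toList, "SILVER".toList, "PLATINUM".toList] : List (List Char)) then
      some (String.ofList (PySem.Chars.lower metal),
            String.ofList (PySem.Chars.strip (PySem.Chars.replace
              (PySem.Chars.lower city) ['_'] [' '])))
    else none

def parse_metal_ticker_alt (ticker : String) : Option (String × String) :=
  let t := PySem.Chars.upper (PySem.Chars.strip ticker.toList)
  if PySem.Chars.endswith t ".MCX".toList then
    pmtAltCore (PySem.Chars.slice t none (some (-4)))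
  else none

-- ===== PRECONDITION & SPEC =====
def Spec_parse_metal_ticker (ticker : String) (out : Option (String × String)) : Prop := out = parse_metal_ticker_alt ticker
instance (ticker : String) (out : Option (String × String)) : Decidable (Spec_parse_metal_ticker ticker out) := by unfold Spec_parse_metal_ticker; infer_instance

-- ===== CLAIM (what is proved, stated in full; the proofs are below) =====
def Claim_equal_parse_metal_ticker : Prop := ∀ (ticker : String), Dom_parse_metal_ticker ticker → Spec_parse_metal_ticker ticker (parse_metal_ticker ticker)

-- ===== LEMMAS AND PROOFS =====

-- If base contains no '_', none of A's candidate prefixes (all ending in '_') can match.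
lemma pmtGo_of_no_underscore (base : List Char) (h : '_' ∉ base) :
    ∀ ms : List (List Char), (∀ m ∈ ms, '_' ∈ m) → pmtGo base ms = none := by
  intro ms hms
  induction ms with
  | nil => rfl
  | cons m ms ih =>
    have hsw : PySem.Chars.startswith base m = false := by
      rw [Bool.eq_false_iff]
      intro hc
      exact h (((PySem.Chars.startswith_iff base m).mp hc).subset (hms m (by simp)))
    simp only [pmtGo, hsw, Bool.false_eq_true, if_false]
    exact ih (fun m hm => hms m (by simp [hm]))

-- A split of base at an underscore with '_'-free head is unique.
lemma pmt_split_unique : ∀ (m P u t : List Char), '_' ∉ m → '_' ∉ P →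
    m ++ '_' :: u = P ++ '_' :: t → m = P ∧ u = t := by
  intro m
  induction m with
  | nil =>
    intro P u t _ hP heq
    cases P with
    | nil => simpa using heq
    | cons c P' =>
      simp only [List.nil_append, List.cons_append, List.cons.injEq] at heq
      exact absurd (heq.1 ▸ (by simp : c ∈ c :: P')) (heq.1 ▸ hP)
  | cons a m ih =>
    intro P u t hm hP heq
    cases P with
    | nil =>
      simp only [List.cons_append, List.nil_append, List.cons.injEq] at heq
      exact absurd (by simp [heq.1]) hm
    | cons c P' =>
      simp only [List.cons_append, List.cons.injEq] at heq
      have hm' : '_' ∉ m := fun h => hm (by simp [h])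
      have hP' : '_' ∉ P' := fun h => hP (by simp [h])
      obtain ⟨h1, h2⟩ := ih P' u t hm' hP' heq.2
      exact ⟨by rw [heq.1, h1], h2⟩

-- rstrip("_") of an '_'-free word followed by one '_' is the word itself.
lemma pmt_dropWhile_no_underscore (l : List Char) (h : '_' ∉ l) :
    l.dropWhile (fun c => c == '_') = l := by
  cases l with
  | nil => rfl
  | cons a l =>
    have ha : (a == '_') = false := by
      simp only [beq_eq_false_iff_ne, ne_eq]
      intro he
      exact h (by simp [he])
    simp [ha]

lemma pmtRstrip_append (m : List Char) (hm : '_' ∉ m) :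
    pmtRstripUnderscore (m ++ ['_']) = m := by
  unfold pmtRstripUnderscore
  rw [List.reverse_append]
  simp only [List.reverse_cons, List.reverse_nil, List.nil_append, List.singleton_append,
    List.dropWhile_cons]
  simp only [beq_self_eq_true, if_true]
  rw [pmt_dropWhile_no_underscore _ (by simpa using hm), List.reverse_reverse]

-- A's loop on base = P ++ '_'::t ('_' ∉ P): returns the hit iff P is among the metals.
lemma pmtGo_split (P t : List Char) (hP : '_' ∉ P) :
    ∀ ms : List (List Char), (∀ m ∈ ms, '_' ∉ m) →
    pmtGo (P ++ '_' :: t) (ms.map (· ++ ['_'])) =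
      (if P ∈ ms then
        some (String.ofList (PySem.Chars.lower P),
              String.ofList (PySem.Chars.strip (PySem.Chars.replace
                (PySem.Chars.lower t) ['_'] [' '])))
       else none) := by
  intro ms hms
  induction ms with
  | nil => simp [pmtGo]
  | cons m ms ih =>
    have hm : '_' ∉ m := hms m (by simp)
    by_cases hPm : m = P
    · subst hPm
      have hsw : PySem.Chars.startswith (m ++ '_' :: t) (m ++ ['_']) = true := by
        rw [PySem.Chars.startswith_iff]
        exact ⟨t, by simp⟩
      simp only [List.map_cons, pmtGo, hsw, if_true]
      rw [if_pos (by simp : m ∈ m :: ms)]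
      have hslice : PySem.Chars.slice (m ++ '_' :: t) (some ((m ++ ['_']).length : Int)) none = t := by
        rw [PySem.Chars.slice, PySem.List.slice_from _ (by positivity)]
        rw [Int.toNat_natCast]
        have : m ++ '_' :: t = (m ++ ['_']) ++ t := by simp
        rw [this, List.drop_left]
      rw [hslice, pmtRstrip_append m hm]
    · have hsw : PySem.Chars.startswith (P ++ '_' :: t) (m ++ ['_']) = false := by
        rw [Bool.eq_false_iff]
        intro hc
        obtain ⟨u, hu⟩ := (PySem.Chars.startswith_iff _ _).mp hc
        have : m ++ '_' :: u = P ++ '_' :: t := by simpa using hu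
        exact hPm (pmt_split_unique m P u t hm hP this).1
      simp only [List.map_cons, pmtGo, hsw, Bool.false_eq_true, if_false]
      rw [ih (fun m hm => hms m (by simp [hm]))]
      by_cases hPms : P ∈ ms
      · rw [if_pos hPms, if_pos (by simp [hPms])]
      · rw [if_neg hPms, if_neg (by
          simp only [List.mem_cons, not_or]
          exact ⟨fun h => hPm h.symm, hPms⟩)]

-- The two post-slice computations agree on every base.
lemma pmt_core (base : List Char) :
    pmtGo base ["GOLD_".toList, "SILVER_".toList, "PLATINUM_".toList] = pmtAltCore base := by
  by_cases hneg : PySem.Chars.find base ['_'] = -1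
  · have hni : ¬ (['_'] <:+: base) := (PySem.Chars.find_eq_neg_one_iff _ _).mp hneg
    have hnb : '_' ∉ base := by
      intro hmem
      obtain ⟨s, u, hsu⟩ := List.append_of_mem hmem
      exact hni ⟨s, u, by simp [hsu]⟩
    rw [pmtGo_of_no_underscore base hnb _ (by decide)]
    simp [pmtAltCore, hneg]
  · have h0 : 0 ≤ PySem.Chars.find base ['_'] := by
      have := PySem.Chars.neg_one_le_find base ['_']
      omega
    obtain ⟨hpre, hmin⟩ := PySem.Chars.find_spec h0
    set n := (PySem.Chars.find base ['_']).toNat with hn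
    have hlen : n ≤ base.length := by
      have := PySem.Chars.find_le_length base ['_']
      omega
    obtain ⟨t, ht⟩ := hpre
    have hbase : base = base.take n ++ '_' :: t := by
      conv_lhs => rw [← List.take_append_drop n base]
      rw [← ht]
      simp
    have hP : '_' ∉ base.take n := by
      intro hmem
      obtain ⟨j, hj, hjv⟩ := List.getElem_of_mem hmem
      have hjn : j < n := lt_of_lt_of_le hj (by simp)
      have hjl : j < base.length := lt_of_lt_of_le hjn hlen
      have hbj : base[j] = '_' := by
        rw [List.getElem_take] at hjv
        exact hjv
      refine hmin j hjn ⟨base.drop (j + 1), ?_⟩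
      rw [List.drop_eq_getElem_cons hjl, hbj]
      rfl
    have hPlen : (base.take n).length = n := by simp [hlen]
    have hmetal : PySem.Chars.slice base none (some (PySem.Chars.find base ['_'])) = base.take n := by
      rw [PySem.Chars.slice, PySem.List.slice_to _ h0]
    have hcity : PySem.Chars.slice base (some (PySem.Chars.find base ['_'] + 1)) none = t := by
      rw [PySem.Chars.slice, PySem.List.slice_from _ (by omega)]
      have htn : (PySem.Chars.find base ['_'] + 1).toNat = n + 1 := by omega
      rw [htn]
      conv_lhs => rw [hbase]
      have : base.take n ++ '_' :: t = (base.take n ++ ['_']) ++ t := by simp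
      rw [this, List.drop_left' (by simp [hPlen])]
    have hms : (["GOLD_".toList, "SILVER_".toList, "PLATINUM_".toList] : List (List Char)) =
        (["GOLD".toList, "SILVER".toList, "PLATINUM".toList] : List (List Char)).map (· ++ ['_']) := by
      decide
    have hne : (PySem.Chars.find base ['_'] == -1) = false := by
      simp only [beq_eq_false_iff_ne, ne_eq]
      exact hneg
    conv_lhs => rw [hbase, hms]
    rw [pmtGo_split (base.take n) t hP _ (by decide)]
    simp only [pmtAltCore, hne, Bool.false_eq_true, if_false, hmetal, hcity]

-- ===== VERDICT (by name: the statement is the Claim_ definition above) =====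
theorem parse_metal_ticker_spec : Claim_equal_parse_metal_ticker := by
  intro ticker _
  simp only [Spec_parse_metal_ticker, parse_metal_ticker, parse_metal_ticker_alt]
  split
  · exact pmt_core _
  · rfl
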